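/- GENERATED by mk_final_copies.py from the proof of the farm's unit `start_decoder.C11g` (farm:start_decoder.C11g.1: Lemmas.lean) as the
   re-elaboration sweep compiled it — do not edit. -/
import Asan.CheckWalk
import Vorbis.Spec.Reader
import Vorbis.Spec.StartDecoderC4
import Vorbis.Spec.Units.start_decoder_C11g

open X86 X86.User Asan Vorbis Vorbis.Spec Vorbis.Spec.StartDecoder

set_option maxRecDepth 100000
set_option maxHeartbeats 4000000

namespace Vorbis.Spec.start_decoder_C11g

/-- **A window the body of loop 3892 may write**: a `C11.QuietWinL` window (the stack below the steady `R`, the reader's windows of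
`*f`), or a window inside the `mults` temp block `[mults, mults + 2·LV)` (the store `mults[j] = q` of 0x114cf2). -/
def MultsWin (g : Ghost) (mults lv : Nat) (w : Span) : Prop :=
  C11.QuietWinL g w ∨ (mults ≤ w.lo ∧ w.hi ≤ mults + 2 * lv)

/-- **THE CARRY OF THE INVARIANT OF LOOP 3892 OVER THE STORE INTO `mults`**: `C11.carryL` with one more kind of window, a window
inside the temp block `mults` (a temp block is disjoint from every setup block: `ArenaOK.blk_tblock_disjoint`; the struct `cb(i)`
and the `sorted_values` block are setup blocks; the slot `q[R+28H]` is on the stack). `hb`: `bits_kept`. -/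
theorem carry_mults {u₀ : State} {g : Ghost} {i : Nat} {A2 A3 Ai : Arena} {A : Arena × List Obj} {mults n j j' : Nat}
    {pc pc' : Word} {v w : State} {ws : List Span} (h : In11L u₀ g i A2 A3 Ai A mults n j pc v)
    (hs : Mem.SameExcept ws v.mem w.mem) (hun : ShadowUntouched v.mem w.mem)
    (hq : ∀ x, x ∈ ws → MultsWin g mults (Codebook.lookup_values v.mem (g.cb v.mem i)) x)
    (hb : Bits (g.Blk A) g.len w.mem g.f)
    (hrip : w.rip = pc') (hrsp : w.reg .rsp = v.reg .rsp) (hcode : CodeOK u₀ w.mem) (hinv : abiInv w)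
    (hr14 : w.reg .r14 = v.reg .r14) (hrbp : w.reg .rbp = addr j')
    (hj : j' ≤ Codebook.lookup_values v.mem (g.cb v.mem i)) :
    In11L u₀ g i A2 A3 Ai A mults n j' pc' w := by
  have hpos : Pos g A := Pos.of h.frame h.cur
  have hm0 : MInv g i A2 A3 Ai A v.mem := MInv.of h.frame h.cur
  have hcw := hm0.c_where
  have ha : ArenaOK A.1 A.2 v.mem g.f := h.cur.sd.arena
  -- the temp block `mults`
  have hT : A.1.TBlock mults (2 * Codebook.lookup_values v.mem (g.cb v.mem i)) :=
    h.mults.temps.tblock List.mem_cons_self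
  have hTr := ha.tblock_range hT
  have hTo := ha.tblock_off hT
  have hr8 := le_r8 (2 * Codebook.lookup_values v.mem (g.cb v.mem i))
  have hTd : ∀ B, A.1.Blk B → B.base + B.size ≤ mults ∨
      mults + 2 * Codebook.lookup_values v.mem (g.cb v.mem i) ≤ B.base := by
    intro B hB
    have hd := ha.blk_tblock_disjoint hB hT
    simp only [vblock] at hd
    exact hd
  -- every window is a window of the carry layer
  have hok : ∀ x, x ∈ ws → OkWin g Ai A (g.cb v.mem i) x := by
    intro x hx
    rcases hq x hx with k | k
    · apply OkWin0.ok
      unfold C11.QuietWinL at k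
      unfold OkWin0
      omega
    · right
      refine ⟨by omega, by omega, ?_⟩
      intro B hB
      have hd := hTd B (Arena.Blk.mono hB h.cur.ages.exti)
      omega
  have hF := Frame.step (pc' := pc') h.frame h.cur hs hun hok hb hrip hrsp hcode hinv
  obtain ⟨hC, hcb⟩ := Cur.step h.frame h.cur hs hun hok hb hr14
  have p1 := hpos.r_eq
  have p2 := hpos.ra_lo
  have p3 := hpos.ra_hi
  have p4 := hpos.f_stack
  -- a setup block of the arena, off the stack, is kept
  have hkeep : ∀ B : Block, A.1.Blk B → B.Kept v.mem w.mem := by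
    intro B hB
    have hd := hTd B hB
    have hoff := ha.block_off hB
    have hin := arena_inside ha hB
    apply Block.Kept.of_sameExcept hs _ (by omega)
    intro x hx
    rcases hq x hx with k | k
    · unfold C11.QuietWinL at k
      obtain ⟨q1, q2, q3, q4, q5, q6, q7, q8, q9, q10, q11, q12, q13, q14⟩ := hpos
      omega
    · omega
  -- the struct `cb(i)`: inside the codebooks block
  have hBA : A.1.Blk (codebooksBlock v.mem g.f) := h.cur.ages.cbOK.F2.mono h.cur.ages.exti
  have hcin := h.cur.ages.cbOK.cb_in i h.cur.lt
  have hstruct : (Codebook.block (g.cb v.mem i)).Kept v.mem w.mem := by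
    apply (hkeep _ hBA).mono
    · simp only [vblock, voff] at hcin ⊢
      exact hcin.1
    · simp only [vblock, voff] at hcin ⊢
      exact hcin.2
  have hsf := Codebook.SameFields.of_kept hstruct
  have hsv : 1 ≤ Codebook.sorted_entries v.mem (g.cb v.mem i) →
      (Codebook.svBlock v.mem (g.cb v.mem i)).Kept v.mem w.mem := by
    intro hse
    exact hkeep _ (h.k.k4.sv hse).1
  have hk15 : K15 (Since Ai A.1) w.mem (g.cb v.mem i) := h.k.frame hstruct hsv
  -- the slot of `mults`
  have hst : Mem.EqOn (g.R + 0x28) (g.R + 0x30) v.mem w.mem := by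
    apply hs.eqOn
    intro x hx
    rcases hq x hx with k | k
    · unfold C11.QuietWinL at k
      omega
    · omega
  have e28 : w.mem.u64 (g.R + 0x28) = v.mem.u64 (g.R + 0x28) :=
    hst.u64 (g.R + 0x28) (Nat.le_refl _) (by omega) (by omega)
  exact
    { frame := hF
      cur := hC
      k := by rw [hcb]; exact hk15
      type_12 := by rw [hcb, hsf.lookup_type]; exact h.type_12
      prod_le := by rw [hcb, hsf.entries, hsf.dimensions]; exact h.prod_le
      mults :=
        { slot := by rw [e28]; exact h.mults.slot
          temps := by rw [hcb, hsf.lookup_values]; exact h.mults.temps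
          lv_pos := by rw [hcb, hsf.lookup_values]; exact h.mults.lv_pos
          lv_lt := by rw [hcb, hsf.lookup_values]; exact h.mults.lv_lt }
      type1_lv := by rw [hcb, hsf.lookup_type, hsf.lookup_values, hsf.entries]; exact h.type1_lv
      type2_lv := by rw [hcb, hsf.lookup_type, hsf.lookup_values, hsf.entries, hsf.dimensions]; exact h.type2_lv
      vb := by rw [hcb, hsf.value_bits]; exact h.vb
      mu0 := by rw [hcb, hsf.multiplicands]; exact h.mu0
      rbp := hrbp
      j_le := by rw [hcb, hsf.lookup_values]; exact hj
      lv_eq := by rw [hcb, hsf.lookup_values]; exact h.lv_eq }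

end Vorbis.Spec.start_decoder_C11g
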